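-- pv_equiv track=rewrite | github.com/ajisaac/balloon-man | words.py | get_words_within_x_chars
-- ===== SOURCE A (Python) =====
-- def get_words_within_x_chars(words, x=23):
--     """ :param words: list of words
--     :param x: max number of chars per line
--     :return: number of words returned, the new phrase """
--     new_word = ''
--     word_count = 0
--     for word in words:
--         if len(new_word + ' ' + word) < x:
--             new_word = new_word + ' ' + word
--             word_count += 1
--         else:
--             break
--     return word_count, new_word
-- ===== SOURCE B (Python) =====
-- def get_words_within_x_chars(words, x=23):
--     """ :param words: list of words
--     :param x: max number of chars per line
--     :return: number of words returned, the new phrase """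
--     cums = []
--     total = 0
--     for w in words:
--         total += len(w) + 1
--         cums.append(total)
--     # each step adds len(w)+1 > 0 chars, so cums is strictly increasing:
--     # the words that fit are exactly those whose cumulative length is < x
--     count = sum(c < x for c in cums)
--     phrase = ''.join(' ' + w for w in words[:count])
--     return count, phrase
-- ===== Notes on version B (the rewrite author's own statement) =====
-- stated objective: alternative
-- what changed: B replaces A's incremental string-building loop with break by computing the prefix-sum line lengths, counting (valid by strict monotonicity) how many stay below x, and building the phrase once with a single join of the fitting word slice; it avoids A's repeated string concatenation when many words fit.
import Mathlib
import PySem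

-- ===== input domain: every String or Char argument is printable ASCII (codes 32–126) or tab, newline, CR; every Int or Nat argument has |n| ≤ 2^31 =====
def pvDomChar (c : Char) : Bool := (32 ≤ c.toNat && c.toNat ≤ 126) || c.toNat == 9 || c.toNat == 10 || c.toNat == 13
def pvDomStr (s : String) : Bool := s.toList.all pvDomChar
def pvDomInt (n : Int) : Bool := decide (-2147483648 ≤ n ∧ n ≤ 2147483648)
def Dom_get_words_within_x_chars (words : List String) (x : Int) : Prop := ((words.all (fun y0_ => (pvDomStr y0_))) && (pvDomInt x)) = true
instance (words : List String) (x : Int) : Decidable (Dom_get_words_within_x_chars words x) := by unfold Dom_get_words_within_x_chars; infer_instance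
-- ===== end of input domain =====

-- B replaces A's incremental string-building loop (break on first overflow) by prefix-sum
-- line lengths, a monotone count of those below x, and one join of the fitting word slice.

-- ===== PORT A =====
-- the for-loop of A: state (new_word, word_count); 'break' = return the state
def pvGoA (x : Int) : List String → String → Int → Int × String
  | [], new_word, word_count => (word_count, new_word)
  | word :: rest, new_word, word_count =>
    if PySem.Str.len (new_word ++ " " ++ word) < x then
      pvGoA x rest (new_word ++ " " ++ word) (word_count + 1)
    else (word_count, new_word)

def get_words_within_x_chars (words : List String) (x : Int) : Int × String :=
  pvGoA x words "" 0

-- ===== PORT B =====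
-- the prefix sums of len(w)+1 over the words, starting from running total s
def pvCums : List String → Int → List Int
  | [], _ => []
  | w :: ws, s => (s + PySem.Str.len w + 1) :: pvCums ws (s + PySem.Str.len w + 1)

def get_words_within_x_chars_alt (words : List String) (x : Int) : Int × String :=
  (((pvCums words 0).countP (fun c => decide (c < x)) : Int),
   PySem.Str.join ""
     ((words.take ((pvCums words 0).countP (fun c => decide (c < x)))).map (fun w => " " ++ w)))

-- ===== PRECONDITION & SPEC =====
def Spec_get_words_within_x_chars (words : List String) (x : Int) (out : Int × String) : Prop := out = get_words_within_x_chars_alt words x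
instance (words : List String) (x : Int) (out : Int × String) : Decidable (Spec_get_words_within_x_chars words x out) := by unfold Spec_get_words_within_x_chars; infer_instance

-- ===== CLAIM (what is proved, stated in full; the proofs are below) =====
def Claim_equal_get_words_within_x_chars : Prop := ∀ (words : List String) (x : Int), Dom_get_words_within_x_chars words x → Spec_get_words_within_x_chars words x (get_words_within_x_chars words x)

-- ===== LEMMAS AND PROOFS =====

-- every prefix sum is strictly above the starting total
theorem pvCums_gt (ws : List String) (s : Int) : ∀ c ∈ pvCums ws s, s < c := by
  induction ws generalizing s with
  | nil => simp [pvCums]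
  | cons w ws ih =>
    intro c hc
    simp only [pvCums, List.mem_cons] at hc
    have hw : (0 : Int) ≤ PySem.Str.len w := by simp [PySem.Str.len_eq]
    rcases hc with rfl | hc
    · omega
    · have := ih _ _ hc; omega

-- ''.join over strings, via toList
theorem pvJoin_nil : PySem.Str.join "" [] = "" := by
  apply String.toList_inj.mp
  simp [PySem.Str.toList_join, PySem.Chars.join, List.intercalate]

theorem pvJoin_cons (p : String) (ps : List String) :
    PySem.Str.join "" (p :: ps) = p ++ PySem.Str.join "" ps := by
  apply String.toList_inj.mp
  simp only [PySem.Str.toList_join, String.toList_append, List.map_cons]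
  cases ps with
  | nil => simp [PySem.Chars.join, List.intercalate]
  | cons q qs => simp [PySem.Chars.join, List.intercalate]

-- loop invariant: A's loop from state (nw, wc) yields B's count and phrase
theorem pvGoA_eq (x : Int) (ws : List String) (nw : String) (wc : Int) :
    pvGoA x ws nw wc =
      (wc + ((pvCums ws (PySem.Str.len nw)).countP (fun c => decide (c < x)) : Int),
       nw ++ PySem.Str.join ""
         ((ws.take ((pvCums ws (PySem.Str.len nw)).countP (fun c => decide (c < x)))).map
           (fun w => " " ++ w))) := by
  induction ws generalizing nw wc with
  | nil => simp [pvGoA, pvCums, pvJoin_nil]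
  | cons w ws ih =>
    have hlen : PySem.Str.len (nw ++ " " ++ w) = PySem.Str.len nw + PySem.Str.len w + 1 := by
      rw [PySem.Str.len_append, PySem.Str.len_append]
      have : PySem.Str.len (" " : String) = 1 := by rw [PySem.Str.len_eq]; rfl
      rw [this]; ring
    simp only [pvGoA, pvCums, hlen]
    by_cases h : PySem.Str.len nw + PySem.Str.len w + 1 < x
    · rw [if_pos h]
      rw [ih (nw ++ " " ++ w) (wc + 1)]
      rw [hlen]
      have hcnt : ((PySem.Str.len nw + PySem.Str.len w + 1) ::
            pvCums ws (PySem.Str.len nw + PySem.Str.len w + 1)).countP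
            (fun c => decide (c < x)) =
          (pvCums ws (PySem.Str.len nw + PySem.Str.len w + 1)).countP
            (fun c => decide (c < x)) + 1 := by
        rw [List.countP_cons, decide_eq_true h]; simp
      rw [hcnt]
      rw [Prod.mk.injEq]
      refine ⟨by push_cast; ring, ?_⟩
      rw [List.take_succ_cons, List.map_cons, pvJoin_cons]
      simp [String.append_assoc]
    · rw [if_neg h]
      have hrest : (pvCums ws (PySem.Str.len nw + PySem.Str.len w + 1)).countP
            (fun c => decide (c < x)) = 0 := by
        rw [List.countP_eq_zero]
        intro c hc
        have := pvCums_gt ws _ c hc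
        simp only [decide_eq_true_eq]
        omega
      have hcnt : ((PySem.Str.len nw + PySem.Str.len w + 1) ::
            pvCums ws (PySem.Str.len nw + PySem.Str.len w + 1)).countP
            (fun c => decide (c < x)) = 0 := by
        rw [List.countP_cons, decide_eq_false h, hrest]; simp
      rw [hcnt]
      simp [pvJoin_nil]

-- ===== VERDICT (by name: the statement is the Claim_ definition above) =====
theorem get_words_within_x_chars_spec : Claim_equal_get_words_within_x_chars := by
  intro words x _
  show get_words_within_x_chars words x = get_words_within_x_chars_alt words x
  unfold get_words_within_x_chars get_words_within_x_chars_alt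
  rw [pvGoA_eq]
  have h0 : PySem.Str.len ("" : String) = 0 := by simp [PySem.Str.len_eq]
  rw [h0, Prod.mk.injEq]
  exact ⟨by simp, by rw [String.empty_append]⟩
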